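-- pv_equiv track=rewrite | github.com/mseverac/Projet_RVAL_SIROP | utils.py | repartir_among_free_spaces
-- ===== SOURCE A (Python) =====
-- def repartir_among_free_spaces(load, fs: list):
--     n = len(fs)
--     repartition = [0] * n
--
--     if n == 0:
--         return repartition, load
--
--     total_capacity = sum(fs)
--
--     # Si le load dépasse la capacité totale
--     if load >= total_capacity:
--         return fs.copy(), load - total_capacity
--
--     remaining = load
--
--     # Tant qu'il reste quelque chose à distribuer
--     while remaining > 0:
--         distributed = False
--
--         for i in range(n):
--             if remaining == 0:
--                 break
--
--             if repartition[i] < fs[i]: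
--                 repartition[i] += 1
--                 remaining -= 1
--                 distributed = True
--
--         # Si on n'a rien pu distribuer → tout est saturé
--         if not distributed:
--             break
--
--     return repartition, remaining
-- ===== SOURCE B (Python) =====
-- def repartir_among_free_spaces(load, fs: list):
--     n = len(fs)
--     if n == 0:
--         return [0] * n, load
--
--     total = sum(fs)
--     if load >= total:
--         return fs.copy(), load - total
--
--     if load <= 0:
--         return [0] * n, load
--
--     # Water-fill: binary-search the largest level k with S(k) <= load,
--     # where S(k) is what a full round-robin up to k units per slot consumes.
--     def S(k):
--         return sum(min(k, f) for f in fs if f > 0)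
--
--     lo, hi = 0, max(fs)          # S(lo) <= load < S(hi)
--     while hi - lo > 1:
--         mid = (lo + hi) // 2
--         if S(mid) <= load:
--             lo = mid
--         else:
--             hi = mid
--     k = lo
--     r = load - S(k)              # leftover units go to the first r unfilled slots
--
--     out = []
--     for f in fs:
--         base = min(k, f) if f > 0 else 0
--         if r > 0 and f > k:
--             out.append(base + 1)
--             r -= 1
--         else:
--             out.append(base)
--     return out, 0
-- ===== Notes on version B (the rewrite author's own statement) =====
-- stated objective: alternative
-- what changed: Replaced the unit-at-a-time round-robin while-loop by a water-fill: binary-search the largest per-slot level k whose full-round consumption S(k) fits in the load, then one pass assigns min(k,f) plus 1 extra to the first leftover slots.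
import Mathlib
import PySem

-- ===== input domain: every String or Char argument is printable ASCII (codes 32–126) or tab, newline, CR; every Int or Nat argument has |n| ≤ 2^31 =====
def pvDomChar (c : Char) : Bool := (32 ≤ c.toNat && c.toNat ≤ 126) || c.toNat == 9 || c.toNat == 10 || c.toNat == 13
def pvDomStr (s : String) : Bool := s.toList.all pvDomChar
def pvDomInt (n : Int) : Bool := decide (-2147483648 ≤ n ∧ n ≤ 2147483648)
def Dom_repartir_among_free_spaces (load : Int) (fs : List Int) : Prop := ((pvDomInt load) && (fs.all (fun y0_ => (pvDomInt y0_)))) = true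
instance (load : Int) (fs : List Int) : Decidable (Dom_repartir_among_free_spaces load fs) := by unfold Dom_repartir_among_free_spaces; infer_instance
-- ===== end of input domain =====

-- B replaces A's unit-at-a-time round-robin by a binary-searched water-fill level plus one
-- distribution pass (objective: alternative algorithm); return values proved equal on all inputs.

-- ===== PORT A =====
-- one `for i in range(n)` pass: walks fs and repartition together, decrementing `remaining`
def passA : List Int → List Int → Int → Bool → List Int × Int × Bool
  | f :: ft, p :: pt, r, d =>
    if r = 0 then (p :: pt, r, d)
    else if p < f then
      let t := passA ft pt (r - 1) true
      ((p + 1) :: t.1, t.2)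
    else
      let t := passA ft pt r d
      (p :: t.1, t.2)
  | _, rep, r, d => (rep, r, d)

theorem passA_r_le : ∀ (fs rep : List Int) (r : Int) (d : Bool), (passA fs rep r d).2.1 ≤ r := by
  intro fs
  induction fs with
  | nil => intro rep r d; simp [passA]
  | cons f ft ih =>
    intro rep r d
    cases rep with
    | nil => simp [passA]
    | cons p pt =>
      simp only [passA]
      split
      · simp
      · split
        · have := ih pt (r - 1) true; dsimp only; omega
        · have := ih pt r d; dsimp only; omega

theorem passA_lt_of_distributed : ∀ (fs rep : List Int) (r : Int),
    (passA fs rep r false).2.2 = true → (passA fs rep r false).2.1 < r := by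
  intro fs
  induction fs with
  | nil => intro rep r h; simp [passA] at h
  | cons f ft ih =>
    intro rep r h
    cases rep with
    | nil => simp [passA] at h
    | cons p pt =>
      by_cases h1 : r = 0
      · simp [passA, h1] at h
      · by_cases h2 : p < f
        · simp only [passA, if_neg h1, if_pos h2] at h ⊢
          have := passA_r_le ft pt (r - 1) true
          omega
        · simp only [passA, if_neg h1, if_neg h2] at h ⊢
          have := ih pt r h
          omega

-- the `while remaining > 0` loop
def whileA (fs rep : List Int) (r : Int) : List Int × Int :=
  if h0 : 0 < r then
    if hd : (passA fs rep r false).2.2 = true then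
      whileA fs (passA fs rep r false).1 (passA fs rep r false).2.1
    else ((passA fs rep r false).1, (passA fs rep r false).2.1)
  else (rep, r)
termination_by r.toNat
decreasing_by
  have := passA_lt_of_distributed fs rep r hd
  omega

def repartir_among_free_spaces (load : Int) (fs : List Int) : List Int × Int :=
  let n := fs.length
  let repartition := List.replicate n (0 : Int)
  if n = 0 then (repartition, load)
  else
    let total := fs.sum
    if load ≥ total then (fs, load - total)
    else whileA fs repartition load

-- ===== PORT B =====
-- S(k) = sum(min(k, f) for f in fs if f > 0)
def SB (fs : List Int) (k : Int) : Int := ((fs.filter (fun f => 0 < f)).map (fun f => min k f)).sum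

theorem bsearch_mid_bounds (lo hi : Int) (h : 1 < hi - lo) :
    lo < PySem.Int.floordiv (lo + hi) 2 ∧ PySem.Int.floordiv (lo + hi) 2 < hi := by
  constructor
  · have := (PySem.Int.le_floordiv_iff_mul_le (a := lo + hi) (b := 2) (q := lo + 1) (by norm_num)).mpr
      (by omega)
    omega
  · exact (PySem.Int.floordiv_lt_iff_lt_mul (a := lo + hi) (b := 2) (q := hi) (by norm_num)).mpr
      (by omega)

-- `while hi - lo > 1: mid = (lo+hi)//2 …`
def bsearchB (fs : List Int) (load lo hi : Int) : Int :=
  if h : 1 < hi - lo then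
    if SB fs (PySem.Int.floordiv (lo + hi) 2) ≤ load then
      bsearchB fs load (PySem.Int.floordiv (lo + hi) 2) hi
    else
      bsearchB fs load lo (PySem.Int.floordiv (lo + hi) 2)
  else lo
termination_by (hi - lo).toNat
decreasing_by
  · have := bsearch_mid_bounds lo hi h; omega
  · have := bsearch_mid_bounds lo hi h; omega

-- the final `for f in fs` distribution pass, carrying the leftover r
def fillB : List Int → Int → Int → List Int
  | [], _, _ => []
  | f :: t, k, r =>
    if 0 < r ∧ k < f then ((if 0 < f then min k f else 0) + 1) :: fillB t k (r - 1)
    else (if 0 < f then min k f else 0) :: fillB t k r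

def repartir_among_free_spaces_alt (load : Int) (fs : List Int) : List Int × Int :=
  if fs.length = 0 then (List.replicate fs.length (0 : Int), load)
  else
    let total := fs.sum
    if load ≥ total then (fs, load - total)
    else if load ≤ 0 then (List.replicate fs.length (0 : Int), load)
    else
      let hi := (PySem.List.max? fs (fun y => y)).getD 0
      let k := bsearchB fs load 0 hi
      (fillB fs k (load - SB fs k), 0)

-- ===== PRECONDITION & SPEC =====
def Spec_repartir_among_free_spaces (load : Int) (fs : List Int) (out : List Int × Int) : Prop := out = repartir_among_free_spaces_alt load fs
instance (load : Int) (fs : List Int) (out : List Int × Int) : Decidable (Spec_repartir_among_free_spaces load fs out) := by unfold Spec_repartir_among_free_spaces; infer_instance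

-- ===== CLAIM (what is proved, stated in full; the proofs are below) =====
def Claim_equal_repartir_among_free_spaces : Prop := ∀ (load : Int) (fs : List Int), Dom_repartir_among_free_spaces load fs → Spec_repartir_among_free_spaces load fs (repartir_among_free_spaces load fs)

-- ===== LEMMAS AND PROOFS =====

-- per-slot water level k: what a slot holds after k full rounds
def clampB (k f : Int) : Int := if 0 < f then min k f else 0

-- number of slots still unfilled at level k
def cntB (fs : List Int) (k : Int) : Int := ((fs.filter (fun f => k < f)).length : Int)

theorem SB_cons (f : Int) (t : List Int) (k : Int) :
    SB (f :: t) k = (if 0 < f then min k f else 0) + SB t k := by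
  by_cases h : 0 < f <;> simp [SB, List.filter_cons, h]

theorem cntB_cons (f : Int) (t : List Int) (k : Int) :
    cntB (f :: t) k = (if k < f then 1 else 0) + cntB t k := by
  by_cases h : k < f <;> simp [cntB, List.filter_cons, h] <;> omega

theorem cntB_nonneg (fs : List Int) (k : Int) : 0 ≤ cntB fs k := by
  simp [cntB]

theorem SB_zero (fs : List Int) : SB fs 0 = 0 := by
  induction fs with
  | nil => simp [SB]
  | cons f t ih => rw [SB_cons, ih]; split <;> omega

theorem SB_succ (fs : List Int) (k : Int) (hk : 0 ≤ k) :
    SB fs (k + 1) = SB fs k + cntB fs k := by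
  induction fs with
  | nil => simp [SB, cntB]
  | cons f t ih =>
    rw [SB_cons, SB_cons, cntB_cons, ih]
    split_ifs <;> omega

theorem SB_mono (fs : List Int) {k k' : Int} (h : k ≤ k') : SB fs k ≤ SB fs k' := by
  induction fs with
  | nil => simp [SB]
  | cons f t ih => rw [SB_cons, SB_cons]; split <;> omega

theorem cntB_antitone (fs : List Int) {k k' : Int} (h : k ≤ k') : cntB fs k' ≤ cntB fs k := by
  induction fs with
  | nil => simp [cntB]
  | cons f t ih => rw [cntB_cons, cntB_cons]; split_ifs <;> omega

theorem clampB_map_eq_of_cnt_zero (fs : List Int) (k : Int) (hk : 0 ≤ k) (h : cntB fs k = 0) :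
    fs.map (clampB k) = fs.map (clampB (k + 1)) := by
  induction fs with
  | nil => simp
  | cons f t ih =>
    rw [cntB_cons] at h
    have ht := cntB_nonneg t k
    have hf : ¬ k < f := by by_contra hc; simp [hc] at h; omega
    simp only [List.map_cons]
    rw [ih (by split_ifs at h <;> omega)]
    congr 1
    simp only [clampB]
    split <;> omega

theorem SB_eq_posSum_of_cnt_zero (fs : List Int) (k : Int) (hk : 0 ≤ k) (h : cntB fs k = 0) :
    SB fs k = (fs.map (fun f => max f 0)).sum := by
  induction fs with
  | nil => simp [SB]
  | cons f t ih =>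
    rw [cntB_cons] at h
    have ht := cntB_nonneg t k
    have hf : ¬ k < f := by by_contra hc; simp [hc] at h; omega
    rw [SB_cons, ih (by split_ifs at h <;> omega)]
    simp only [List.map_cons, List.sum_cons]
    split <;> omega

theorem sum_le_posSum (fs : List Int) : fs.sum ≤ (fs.map (fun f => max f 0)).sum := by
  induction fs with
  | nil => simp
  | cons f t ih => simp only [List.map_cons, List.sum_cons]; have := le_max_left f 0; omega

theorem cntB_zero_of_forall_le (fs : List Int) (k : Int) (h : ∀ f ∈ fs, f ≤ k) : cntB fs k = 0 := by
  induction fs with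
  | nil => simp [cntB]
  | cons f t ih =>
    rw [cntB_cons, ih (fun x hx => h x (List.mem_cons_of_mem f hx))]
    have := h f List.mem_cons_self
    split_ifs <;> omega

theorem exists_pos_of_sum_pos (fs : List Int) (h : 0 < fs.sum) : ∃ f ∈ fs, 0 < f := by
  induction fs with
  | nil => simp at h
  | cons f t ih =>
    by_cases hf : 0 < f
    · exact ⟨f, List.mem_cons_self, hf⟩
    · simp only [List.sum_cons] at h
      obtain ⟨g, hg, hg0⟩ := ih (by omega)
      exact ⟨g, List.mem_cons_of_mem f hg, hg0⟩

theorem fillB_zero (fs : List Int) (k r : Int) (hr : r ≤ 0) : fillB fs k r = fs.map (clampB k) := by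
  induction fs generalizing r with
  | nil => simp [fillB]
  | cons f t ih =>
    rw [fillB, if_neg (by omega)]
    simp [ih r hr, clampB]

theorem fillB_full (fs : List Int) (k r : Int) (hk : 0 ≤ k) (hr : cntB fs k ≤ r) :
    fillB fs k r = fs.map (clampB (k + 1)) := by
  induction fs generalizing r with
  | nil => simp [fillB]
  | cons f t ih =>
    rw [cntB_cons] at hr
    have ht := cntB_nonneg t k
    by_cases hf : k < f
    · rw [fillB, if_pos ⟨by simp [hf] at hr; omega, hf⟩, ih (r - 1) (by simp [hf] at hr; omega)]
      simp only [List.map_cons, clampB]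
      rw [if_pos (by omega)]
      congr 1
      omega
    · rw [fillB, if_neg (by simp [hf])]
      rw [ih r (by simp [hf] at hr; omega)]
      simp only [List.map_cons, clampB]
      congr 1
      split_ifs <;> omega

-- the pass characterisation: one Python for-pass over rep = clampB k ∘ fs
theorem passA_clamp (fs : List Int) (k : Int) (hk : 0 ≤ k) :
    ∀ (r : Int) (d : Bool), 0 ≤ r →
    passA fs (fs.map (clampB k)) r d =
      (fillB fs k r, r - min r (cntB fs k), d || decide (0 < min r (cntB fs k))) := by
  induction fs with
  | nil => intro r d hr; simp [passA, fillB, cntB]; omega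
  | cons f t ih =>
    intro r d hr
    have ht := cntB_nonneg t k
    by_cases hr0 : r = 0
    · subst hr0
      rw [List.map_cons, passA, if_pos rfl, fillB_zero _ _ _ le_rfl]
      have : min 0 (cntB (f :: t) k) = 0 := by have := cntB_nonneg (f :: t) k; omega
      simp [this, clampB]
    · have hrpos : 0 < r := by omega
      by_cases hf : k < f
      · have hlt : clampB k f < f := by simp only [clampB]; split <;> omega
        rw [List.map_cons, passA, if_neg hr0, if_pos hlt]
        rw [ih (r - 1) true (by omega)]
        rw [fillB, if_pos ⟨hrpos, hf⟩, cntB_cons, if_pos hf]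
        have hmin : min r (1 + cntB t k) = 1 + min (r - 1) (cntB t k) := by omega
        have hflag : (0 < min r (1 + cntB t k)) := by omega
        simp only [clampB, if_pos (show (0:Int) < f by omega), hmin]
        simp only [Prod.mk.injEq]
        refine ⟨by trivial, by omega, ?_⟩
        simp
        omega
      · have hlt : ¬ clampB k f < f := by simp only [clampB]; split <;> omega
        rw [List.map_cons, passA, if_neg hr0, if_neg hlt]
        rw [ih r d hr]
        rw [fillB, if_neg (by simp [hf]), cntB_cons, if_neg hf]
        simp only [clampB]
        simp only [Prod.mk.injEq]
        refine ⟨by trivial, by omega, ?_⟩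
        simp

-- the while loop from level k reaches the water-fill answer at level kB
theorem whileA_fill (fs : List Int) (load kB : Int) (hkB : 0 ≤ kB)
    (hle : SB fs kB ≤ load) (hlt : load < SB fs (kB + 1)) :
    ∀ n k, (kB - k).toNat = n → 0 ≤ k → k ≤ kB → SB fs k ≤ load →
    whileA fs (fs.map (clampB k)) (load - SB fs k) =
      (fillB fs kB (load - SB fs kB), 0) := by
  intro n
  induction n using Nat.strong_induction_on with
  | _ n IH =>
    intro k hn hk0 hkkB hSk
    by_cases hr0 : load - SB fs k ≤ 0
    · -- remaining is 0 already (load = SB k)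
      have hEq : SB fs k = load := by omega
      rcases eq_or_lt_of_le hkkB with hEqk | hltk
      · subst hEqk
        rw [whileA, dif_neg (by omega), fillB_zero _ _ _ (by omega)]
        simp [hEq]
      · -- k < kB : cnt k = 0, levels coincide
        have h1 : SB fs (k + 1) ≤ SB fs kB := SB_mono fs (by omega)
        have h2 := SB_succ fs k hk0
        have hc0 : cntB fs k = 0 := by have := cntB_nonneg fs k; omega
        have hmaps := clampB_map_eq_of_cnt_zero fs k hk0 hc0
        have := IH (kB - (k + 1)).toNat (by omega) (k + 1) rfl (by omega) (by omega) (by omega)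
        rw [whileA, dif_neg (by omega)]
        rw [hmaps]
        rw [whileA, dif_neg (by omega)] at this
        rw [show load - SB fs k = load - SB fs (k + 1) from by omega]
        exact this
    · have hrpos : 0 < load - SB fs k := by omega
      rcases eq_or_lt_of_le hkkB with hEqk | hltk
      · -- k = kB : partial round finishes
        subst hEqk
        have hcnt : load - SB fs k < cntB fs k := by
          have := SB_succ fs k hk0; omega
        rw [whileA, dif_pos hrpos,
          passA_clamp fs k hk0 (load - SB fs k) false (by omega)]
        have hmin : min (load - SB fs k) (cntB fs k) = load - SB fs k := by omega
        rw [hmin]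
        simp only [decide_eq_true_eq, Bool.false_or]
        rw [dif_pos (by first | (simp; omega) | omega)]
        rw [whileA, dif_neg (by omega)]
        congr 1
        omega
      · -- k < kB : full round, recurse at level k+1
        have h1 : SB fs (k + 1) ≤ SB fs kB := SB_mono fs (by omega)
        have h2 := SB_succ fs k hk0
        have hcle : cntB fs k ≤ load - SB fs k := by omega
        have hcpos : 0 < cntB fs k := by
          by_contra hc
          have hc0 : cntB fs k = 0 := by have := cntB_nonneg fs k; omega
          have : cntB fs kB ≤ cntB fs k := cntB_antitone fs (by omega)
          have := SB_succ fs kB hkB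
          have := cntB_nonneg fs kB
          omega
        rw [whileA, dif_pos hrpos,
          passA_clamp fs k hk0 (load - SB fs k) false (by omega)]
        have hmin : min (load - SB fs k) (cntB fs k) = cntB fs k := by omega
        rw [hmin]
        simp only [decide_eq_true_eq, Bool.false_or]
        rw [dif_pos (by first | (simp; omega) | omega)]
        rw [fillB_full fs k _ hk0 hcle]
        have := IH (kB - (k + 1)).toNat (by omega) (k + 1) rfl (by omega) (by omega) (by omega)
        rw [show load - SB fs k - cntB fs k = load - SB fs (k + 1) by omega]
        exact this

theorem bsearchB_spec (fs : List Int) (load : Int) :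
    ∀ n lo hi, (hi - lo).toNat = n → 0 ≤ lo → lo < hi → SB fs lo ≤ load → load < SB fs hi →
    0 ≤ bsearchB fs load lo hi ∧ SB fs (bsearchB fs load lo hi) ≤ load ∧
      load < SB fs (bsearchB fs load lo hi + 1) := by
  intro n
  induction n using Nat.strong_induction_on with
  | _ n IH =>
    intro lo hi hn hlo hlohi hSlo hShi
    by_cases h : 1 < hi - lo
    · obtain ⟨hm1, hm2⟩ := bsearch_mid_bounds lo hi h
      rw [bsearchB, dif_pos h]
      by_cases hS : SB fs (PySem.Int.floordiv (lo + hi) 2) ≤ load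
      · rw [if_pos hS]
        exact IH (hi - PySem.Int.floordiv (lo + hi) 2).toNat (by omega) _ _ rfl (by omega) hm2 hS hShi
      · rw [if_neg hS]
        exact IH (PySem.Int.floordiv (lo + hi) 2 - lo).toNat (by omega) _ _ rfl hlo hm1 hSlo (by omega)
    · rw [bsearchB, dif_neg h]
      have : hi = lo + 1 := by omega
      subst this
      exact ⟨hlo, hSlo, hShi⟩

theorem replicate_eq_map_clamp_zero (fs : List Int) :
    List.replicate fs.length (0 : Int) = fs.map (clampB 0) := by
  induction fs with
  | nil => simp
  | cons f t ih =>
    simp only [List.length_cons, List.replicate_succ, List.map_cons, ih]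
    congr 1
    simp only [clampB]
    split <;> omega

-- ===== VERDICT (by name: the statement is the Claim_ definition above) =====
theorem repartir_among_free_spaces_spec : Claim_equal_repartir_among_free_spaces := by
  intro load fs _dom
  unfold Spec_repartir_among_free_spaces
  unfold repartir_among_free_spaces repartir_among_free_spaces_alt
  by_cases hn : fs.length = 0
  · simp [hn]
  · simp only [hn, if_false]
    by_cases hload : load ≥ fs.sum
    · simp [hload]
    · simp only [hload, if_false]
      by_cases hlz : load ≤ 0
      · rw [if_pos hlz, whileA, dif_neg (by omega)]
      · rw [if_neg hlz]
        -- load > 0, load < sum fs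
        have hsumpos : 0 < fs.sum := by omega
        obtain ⟨g, hg, hg0⟩ := exists_pos_of_sum_pos fs hsumpos
        have hne : fs ≠ [] := by cases fs <;> simp_all
        obtain ⟨m, hm⟩ : ∃ m, PySem.List.max? fs (fun y => y) = some m := by
          cases hmm : PySem.List.max? fs (fun y => y) with
          | none => rw [PySem.List.max?_eq_none_iff] at hmm; exact absurd hmm hne
          | some m => exact ⟨m, rfl⟩
        have hmax := PySem.List.max?_isMax hm
        have hgm : g ≤ m := hmax g hg
        have hm0 : 0 < m := by omega
        have hSm : SB fs m = (fs.map (fun f => max f 0)).sum :=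
          SB_eq_posSum_of_cnt_zero fs m (by omega)
            (cntB_zero_of_forall_le fs m hmax)
        have hloadlt : load < SB fs m := by
          have := sum_le_posSum fs; omega
        simp only [hm, Option.getD_some]
        obtain ⟨hk0, hkle, hklt⟩ := bsearchB_spec fs load (m - 0).toNat 0 m rfl le_rfl hm0
          (by rw [SB_zero]; omega) hloadlt
        have hmain := whileA_fill fs load (bsearchB fs load 0 m) hk0 hkle hklt
          ((bsearchB fs load 0 m) - 0).toNat 0 rfl le_rfl hk0 (by rw [SB_zero]; omega)
        rw [SB_zero, sub_zero] at hmain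
        rw [replicate_eq_map_clamp_zero fs]
        exact hmain
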